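-- pv_equiv track=rewrite | github.com/simphony/simphony-osp | simphony_osp/utils/pico.py | graph_set_to_dict
-- ===== SOURCE A (Python) =====
-- from typing import (
--     Callable,
--     Dict,
--     Hashable,
--     Iterable,
--     Iterator,
--     List,
--     MutableMapping,
--     Optional,
--     Set,
--     Tuple,
--     TypeVar,
--     Union,
-- )
--
-- HASHABLE = TypeVar("HASHABLE", bound=Hashable)
--
-- def graph_set_to_dict(
--     arcs: Set[Tuple[HASHABLE, HASHABLE]]
-- ) -> MutableMapping[HASHABLE, Set[HASHABLE]]:
--     """Convert the graph from a set of arcs to a dictionary (fast lookup).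
--
--     Transforms a set of arcs into a dictionary of arcs.
--
--     Args:
--         arcs: A set of arcs (directed edges) represented by tuples, where
--             their first element is the tail and the second the head.
--
--     Returns:
--         A dictionary of arcs, where the keys represent the tail of an arc
--         and each value is a set of heads for such tail. Therefore,
--         each key-value pair represents several arcs.
--     """
--     graph = dict()
--     for x, y in arcs:
--         if x not in graph:
--             graph[x] = {y}
--         else:
--             graph[x] |= {y}
--         if y not in graph:
--             graph[y] = set()
--     return graph
-- ===== SOURCE B (Python) =====
-- def graph_set_to_dict(arcs):
--     """Brute-force group-by: list the nodes, then for each node scan all arcs for its heads."""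
--     nodes = dict.fromkeys(n for arc in arcs for n in arc)
--     return {n: {y for x, y in arcs if x == n} for n in nodes}
-- ===== Notes on version B (the rewrite author's own statement) =====
-- stated objective: alternative
-- what changed: Replaces A's single incremental pass (hash dict of sets built with inline existence checks) by a brute-force group-by: enumerate the distinct nodes once, then compute each node's head-set by an independent full scan of the arcs (a per-key filter, O(n*k) instead of O(n)).
import Mathlib
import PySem

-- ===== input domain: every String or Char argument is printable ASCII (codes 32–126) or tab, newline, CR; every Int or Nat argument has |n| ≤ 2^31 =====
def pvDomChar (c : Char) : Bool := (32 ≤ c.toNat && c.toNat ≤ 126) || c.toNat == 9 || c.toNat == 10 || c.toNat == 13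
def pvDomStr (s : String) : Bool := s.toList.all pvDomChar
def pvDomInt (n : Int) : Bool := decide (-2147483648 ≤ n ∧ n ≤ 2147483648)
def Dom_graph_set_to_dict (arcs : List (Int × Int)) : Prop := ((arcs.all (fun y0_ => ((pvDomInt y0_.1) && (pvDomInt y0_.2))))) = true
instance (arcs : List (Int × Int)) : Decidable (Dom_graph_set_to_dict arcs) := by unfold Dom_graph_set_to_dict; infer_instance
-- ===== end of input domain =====

-- B replaces A's single incremental dict-of-sets pass by a brute-force group-by: enumerate the
-- distinct nodes, then compute each node's head-set by an independent full scan of the arcs.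

-- ===== PORT A =====
-- one loop iteration of A: handle the tail x, then ensure the head y has a key
def pvStepA (g : PySem.Dict Int (PySem.Set Int)) (p : Int × Int) : PySem.Dict Int (PySem.Set Int) :=
  let g1 := if !(g.contains p.1) then
      g.insert p.1 (PySem.Set.ofList [p.2])          -- graph[x] = {y}
    else
      g.modify p.1 PySem.Set.empty (fun s => PySem.Set.union s (PySem.Set.ofList [p.2]))  -- graph[x] |= {y}
  if !(g1.contains p.2) then g1.insert p.2 PySem.Set.empty else g1  -- if y not in graph: graph[y] = set()

def graph_set_to_dict (arcs : List (Int × Int)) : List (Int × List Int) :=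
  (arcs.foldl pvStepA PySem.Dict.empty).items

-- ===== PORT B =====
def graph_set_to_dict_alt (arcs : List (Int × Int)) : List (Int × List Int) :=
  -- nodes = dict.fromkeys(n for arc in arcs for n in arc)
  let nodes : List Int := PySem.Set.ofList (arcs.flatMap (fun p => [p.1, p.2]))
  -- {n: {y for x, y in arcs if x == n} for n in nodes}
  nodes.map (fun n =>
    (n, (PySem.Set.ofList ((arcs.filter (fun p => p.1 == n)).map (fun p => p.2)) : PySem.Set Int)))

-- ===== PRECONDITION & SPEC =====
def Spec_graph_set_to_dict (arcs : List (Int × Int)) (out : List (Int × List Int)) : Prop := out = graph_set_to_dict_alt arcs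
instance (arcs : List (Int × Int)) (out : List (Int × List Int)) : Decidable (Spec_graph_set_to_dict arcs out) := by unfold Spec_graph_set_to_dict; infer_instance

-- ===== CLAIM (what is proved, stated in full; the proofs are below) =====
def Claim_equal_graph_set_to_dict : Prop := ∀ (arcs : List (Int × Int)), Dom_graph_set_to_dict arcs → Spec_graph_set_to_dict arcs (graph_set_to_dict arcs)

-- ===== LEMMAS AND PROOFS =====

-- the canonical result both ports compute: keys in first-appearance order, value = heads in arc order
def pvNodes (l : List (Int × Int)) : List Int := PySem.Set.ofList (l.flatMap (fun p => [p.1, p.2]))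
def pvHeads (l : List (Int × Int)) (n : Int) : List Int :=
  PySem.Set.ofList (((l.filter (fun p => p.1 == n)).map (fun p => p.2)))
def pvItems (l : List (Int × Int)) : List (Int × List Int) := (pvNodes l).map (fun n => (n, pvHeads l n))

theorem pv_alt_items (l : List (Int × Int)) : graph_set_to_dict_alt l = pvItems l := rfl

theorem pv_contains_map (ks : List Int) (v : Int → List Int) (x : Int) :
    (PySem.Dict.mk ((ks.map (fun n => (n, v n)) : List (Int × List Int)))).contains x = true ↔ x ∈ ks := by
  simp [PySem.Dict.contains, List.any_map, List.any_eq_true, Function.comp]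

theorem pv_getD_map (ks : List Int) (v : Int → List Int) (x : Int) (hx : x ∈ ks) (dflt : List Int) :
    (PySem.Dict.mk ((ks.map (fun n => (n, v n)) : List (Int × List Int)))).getD x dflt = v x := by
  induction ks with
  | nil => cases hx
  | cons a t ih =>
    by_cases h : a = x
    · subst h; simp [PySem.Dict.getD, PySem.Dict.get?]
    · have hx' : x ∈ t := by cases hx with
        | head => exact absurd rfl h
        | tail _ h' => exact h'
      have hne : (a == x) = false := by simp [h]
      simpa [PySem.Dict.getD, PySem.Dict.get?, List.find?, hne] using ih hx'

theorem pv_insert_mem (ks : List Int) (v : Int → List Int) (x : Int) (hx : x ∈ ks) (w : List Int) :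
    (PySem.Dict.mk ((ks.map (fun n => (n, v n)) : List (Int × List Int)))).insert x w
      = PySem.Dict.mk (ks.map (fun n => (n, if n = x then w else v n))) := by
  have hc : (PySem.Dict.mk ((ks.map (fun n => (n, v n)) : List (Int × List Int)))).contains x = true :=
    (pv_contains_map ks v x).mpr hx
  simp only [PySem.Dict.insert, hc, if_pos]
  congr 1
  simp only [List.map_map]
  refine List.map_congr_left (fun n _ => ?_)
  by_cases h : n = x
  · subst h; simp
  · simp [h]

theorem pv_insert_fresh (ks : List Int) (v : Int → List Int) (x : Int) (hx : x ∉ ks) (w : List Int) :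
    (PySem.Dict.mk ((ks.map (fun n => (n, v n)) : List (Int × List Int)))).insert x w
      = PySem.Dict.mk (ks.map (fun n => (n, v n)) ++ [(x, w)]) := by
  have hc : (PySem.Dict.mk ((ks.map (fun n => (n, v n)) : List (Int × List Int)))).contains x = false := by
    cases h : (PySem.Dict.mk ((ks.map (fun n => (n, v n)) : List (Int × List Int)))).contains x
    · rfl
    · exact absurd ((pv_contains_map ks v x).mp h) hx
  simp [PySem.Dict.insert, hc]

theorem pv_mem_nodes_tail (l : List (Int × Int)) (p : Int × Int) (hp : p ∈ l) : p.1 ∈ pvNodes l := by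
  unfold pvNodes
  rw [PySem.Set.mem_ofList]
  exact List.mem_flatMap.mpr ⟨p, hp, by simp⟩

theorem pv_heads_nil (l : List (Int × Int)) (x : Int) (hx : x ∉ pvNodes l) :
    l.filter (fun p => p.1 == x) = [] := by
  rw [List.filter_eq_nil_iff]
  intro p hp hbx
  have : p.1 = x := by simpa using hbx
  exact hx (this ▸ pv_mem_nodes_tail l p hp)

theorem pv_nodes_append (l : List (Int × Int)) (p : Int × Int) :
    pvNodes (l ++ [p]) = PySem.Set.add (PySem.Set.add (pvNodes l) p.1) p.2 := by
  unfold pvNodes PySem.Set.ofList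
  rw [List.flatMap_append, List.foldl_append]
  rfl

theorem pv_heads_append (l : List (Int × Int)) (x y n : Int) :
    pvHeads (l ++ [(x, y)]) n = if x = n then PySem.Set.add (pvHeads l n) y else pvHeads l n := by
  unfold pvHeads PySem.Set.ofList
  rw [List.filter_append, List.map_append]
  by_cases h : x = n
  · simp [h, List.foldl_append]
  · simp [h]

theorem pv_add_of_mem {s : PySem.Set Int} {x : Int} (hx : x ∈ s) : PySem.Set.add s x = s := by
  simp [PySem.Set.add, hx]

theorem pv_add_of_not_mem {s : PySem.Set Int} {x : Int} (hx : x ∉ s) : PySem.Set.add s x = s ++ [x] := by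
  simp [PySem.Set.add, hx]

theorem pv_contains_map_false (ks : List Int) (v : Int → List Int) (x : Int) (hx : x ∉ ks) :
    (PySem.Dict.mk ((ks.map (fun n => (n, v n)) : List (Int × List Int)))).contains x = false := by
  cases h : (PySem.Dict.mk ((ks.map (fun n => (n, v n)) : List (Int × List Int)))).contains x
  · rfl
  · exact absurd ((pv_contains_map ks v x).mp h) hx

-- A's fold computes the canonical items
theorem pv_foldA_items (l : List (Int × Int)) :
    l.foldl pvStepA PySem.Dict.empty = PySem.Dict.mk (pvItems l) := by
  induction l using List.reverseRecOn with
  | nil => rfl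
  | append_singleton l p ih =>
    obtain ⟨x, y⟩ := p
    rw [List.foldl_append, List.foldl_cons, List.foldl_nil, ih]
    unfold pvItems
    rw [pv_nodes_append]
    by_cases hx : x ∈ pvNodes l
    · have hc : (PySem.Dict.mk ((pvNodes l).map (fun n => (n, pvHeads l n)))).contains x = true :=
        (pv_contains_map _ _ _).mpr hx
      have hgd : (PySem.Dict.mk ((pvNodes l).map (fun n => (n, pvHeads l n)))).getD x PySem.Set.empty
          = pvHeads l x := pv_getD_map _ _ _ hx _
      simp only [pvStepA, hc, Bool.not_true, Bool.false_eq_true, if_false]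
      rw [show (PySem.Dict.mk ((pvNodes l).map (fun n => (n, pvHeads l n)))).modify x PySem.Set.empty
            (fun s => PySem.Set.union s (PySem.Set.ofList [(x, y).2]))
          = (PySem.Dict.mk ((pvNodes l).map (fun n => (n, pvHeads l n)))).insert x
              (PySem.Set.add (pvHeads l x) y) from by
        unfold PySem.Dict.modify
        rw [hgd]
        rfl]
      rw [pv_insert_mem _ _ _ hx, pv_add_of_mem hx]
      have hmap : ∀ n ∈ pvNodes l, (n, pvHeads (l ++ [(x, y)]) n)
          = (n, if n = x then PySem.Set.add (pvHeads l x) y else pvHeads l n) := by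
        intro n hn
        rw [pv_heads_append]
        by_cases h : x = n
        · subst h; simp
        · have h' : ¬ n = x := fun hh => h hh.symm
          simp [h, h']
      by_cases hy : y ∈ pvNodes l
      · have hcy : (PySem.Dict.mk ((pvNodes l).map
            (fun n => (n, if n = x then PySem.Set.add (pvHeads l x) y else pvHeads l n)))).contains y = true :=
          (pv_contains_map _ _ _).mpr hy
        simp only [hcy, Bool.not_true, Bool.false_eq_true, if_false]
        rw [pv_add_of_mem hy]
        exact congrArg PySem.Dict.mk (List.map_congr_left hmap).symm
      · have hcy : (PySem.Dict.mk ((pvNodes l).map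
            (fun n => (n, if n = x then PySem.Set.add (pvHeads l x) y else pvHeads l n)))).contains y = false :=
          pv_contains_map_false _ _ _ hy
        simp only [hcy, Bool.not_false, if_true]
        rw [pv_insert_fresh _ _ _ hy, pv_add_of_not_mem hy, List.map_append]
        refine congrArg PySem.Dict.mk ?_
        refine congrArg₂ (· ++ ·) (List.map_congr_left hmap).symm ?_
        have hxy : ¬ x = y := fun h => hy (h ▸ hx)
        rw [List.map_singleton, pv_heads_append]
        simp [hxy, pv_heads_nil l y hy, pvHeads]
    · have hc : (PySem.Dict.mk ((pvNodes l).map (fun n => (n, pvHeads l n)))).contains x = false :=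
        pv_contains_map_false _ _ _ hx
      simp only [pvStepA, hc, Bool.not_false, if_true]
      rw [pv_insert_fresh _ _ _ hx, pv_add_of_not_mem hx]
      have hone : PySem.Set.ofList [(x, y).2] = ([y] : List Int) := rfl
      rw [hone]
      have hitems : (pvNodes l).map (fun n => (n, pvHeads l n)) ++ [(x, [y])]
          = (pvNodes l ++ [x]).map (fun n => (n, if n = x then [y] else pvHeads l n)) := by
        rw [List.map_append]
        refine congrArg₂ (· ++ ·) ?_ (by simp)
        refine List.map_congr_left (fun n hn => ?_)
        have h : ¬ n = x := fun h => hx (h ▸ hn)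
        simp [h]
      rw [hitems]
      have hmap : ∀ n ∈ pvNodes l ++ [x], (n, pvHeads (l ++ [(x, y)]) n)
          = (n, if n = x then [y] else pvHeads l n) := by
        intro n hn
        rw [pv_heads_append]
        by_cases h : x = n
        · subst h
          simp only [if_pos]
          rw [show pvHeads l x = ([] : List Int) from by
            simp [pvHeads, pv_heads_nil l x hx, PySem.Set.ofList]]
          rfl
        · have h' : ¬ n = x := fun hh => h hh.symm
          simp [h, h']
      by_cases hy : y ∈ pvNodes l ++ [x]
      · have hcy : (PySem.Dict.mk ((pvNodes l ++ [x]).map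
            (fun n => (n, if n = x then [y] else pvHeads l n)))).contains y = true :=
          (pv_contains_map _ _ _).mpr hy
        simp only [hcy, Bool.not_true, Bool.false_eq_true, if_false]
        have hadd : PySem.Set.add (pvNodes l ++ [x]) y = pvNodes l ++ [x] := pv_add_of_mem hy
        rw [hadd]
        exact congrArg PySem.Dict.mk (List.map_congr_left hmap).symm
      · have hcy : (PySem.Dict.mk ((pvNodes l ++ [x]).map
            (fun n => (n, if n = x then [y] else pvHeads l n)))).contains y = false :=
          pv_contains_map_false _ _ _ hy
        simp only [hcy, Bool.not_false, if_true]
        have hadd : PySem.Set.add (pvNodes l ++ [x]) y = (pvNodes l ++ [x]) ++ [y] :=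
          pv_add_of_not_mem hy
        rw [hadd, pv_insert_fresh _ _ _ hy]
        refine congrArg PySem.Dict.mk ?_
        conv_rhs => rw [List.map_append]
        refine congrArg₂ (· ++ ·) (List.map_congr_left hmap).symm ?_
        have hyl : y ∉ pvNodes l := fun h => hy (List.mem_append_left _ h)
        have hxy : ¬ x = y := fun h => hy (List.mem_append_right _ (by simp [h]))
        rw [List.map_singleton, pv_heads_append]
        simp [hxy, pv_heads_nil l y hyl, pvHeads]

-- ===== VERDICT (by name: the statement is the Claim_ definition above) =====
theorem graph_set_to_dict_spec : Claim_equal_graph_set_to_dict := by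
  intro arcs _
  unfold Spec_graph_set_to_dict graph_set_to_dict
  rw [pv_foldA_items, pv_alt_items]
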